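-- pv_equiv track=rewrite | github.com/Johnattanls/Kaggle-Python-exercises | 6-Exercise-Strings-and-Dictionaries.py | multi_word_search
-- ===== SOURCE A (Python) =====
-- def multi_word_search(doc_list, keywords):
--     """
--     Takes list of documents (each document is a string) and a list of keywords.
--     Returns a dictionary where each key is a keyword, and the value is a list of indices
--     (from doc_list) of the documents containing that keyword
--
--     >>> doc_list = ["The Learn Python Challenge Casino.", "They bought a car and a casino", "Casinoville"]
--     >>> keywords = ['casino', 'they']
--     >>> multi_word_search(doc_list, keywords)
--     {'casino': [0, 1], 'they': [1]}
--     """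
--     indices=[]
--     keys=[]
--     for keyword in keywords:
--         indices_check=[]
--         lista_indice=[]
--         for i, doc in enumerate(doc_list):
--             tokens = doc.split()
--             normalized = [token.rstrip('.,').lower() for token in tokens] #lista do respectivo doc, normalizada!
--             if keyword.lower() in normalized:
--                 lista_indice.append(i)
--                 indices_check.append(i)
--         if indices_check==[]:
--             indices.append(indices_check)
--         else:
--             indices.append(lista_indice)
--         keys.append(keyword)
--     dictionary={key:indices[keys.index(key)] for key in keys}
--     return dictionary
-- ===== SOURCE B (Python) =====
-- def multi_word_search(doc_list, keywords):
--     # Build an inverted index once: normalized token -> ascending list of doc indices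
--     # (each doc counted at most once per token), then answer every keyword by lookup.
--     index = {}
--     for i, doc in enumerate(doc_list):
--         seen = set()
--         for token in doc.split():
--             w = token.rstrip('.,').lower()
--             if w not in seen:
--                 seen.add(w)
--                 index.setdefault(w, []).append(i)
--     return {kw: list(index.get(kw.lower(), [])) for kw in keywords}
-- ===== Notes on version B (the rewrite author's own statement) =====
-- stated objective: faster
-- what changed: B builds an inverted index (normalized token -> ascending doc indices, deduped per document) in one pass over the documents and answers each keyword by a dictionary lookup, instead of A's re-tokenizing and rescanning every document for every keyword.
import Mathlib
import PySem

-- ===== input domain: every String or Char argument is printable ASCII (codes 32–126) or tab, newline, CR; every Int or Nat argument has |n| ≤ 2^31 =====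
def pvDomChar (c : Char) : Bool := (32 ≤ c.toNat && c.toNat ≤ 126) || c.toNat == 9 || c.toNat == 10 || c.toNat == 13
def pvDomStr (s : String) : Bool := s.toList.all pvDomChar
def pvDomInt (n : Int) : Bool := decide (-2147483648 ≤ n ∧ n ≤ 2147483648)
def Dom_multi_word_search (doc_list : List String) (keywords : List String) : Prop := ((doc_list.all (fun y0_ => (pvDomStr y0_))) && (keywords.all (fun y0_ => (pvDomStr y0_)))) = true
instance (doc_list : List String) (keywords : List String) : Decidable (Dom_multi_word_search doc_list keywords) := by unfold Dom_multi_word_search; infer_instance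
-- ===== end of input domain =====

-- B replaces A's per-keyword rescan of all documents with one inverted-index pass over the
-- documents plus a lookup per keyword (objective: alternative decomposition).

-- ===== PORT A =====
-- token.rstrip('.,').lower(); rstrip('.,') has no PySem primitive, ported by hand:
-- drop trailing '.' / ',' characters (exact for any string).
def pvNormTok (t : String) : String :=
  PySem.Str.lower (String.ofList ((t.toList.reverse.dropWhile (fun c => c == '.' || c == ',')).reverse))

-- [token.rstrip('.,').lower() for token in doc.split()]
def pvNorm (doc : String) : List String :=
  (PySem.Str.split₀ doc).map pvNormTok

def multi_word_search (doc_list : List String) (keywords : List String) : List (String × List Int) :=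
  -- state: (indices, keys)
  let st := keywords.foldl (fun (st : List (List Int) × List String) keyword =>
      -- inner state: (indices_check, lista_indice)
      let inner := (PySem.List.enumerate doc_list).foldl
        (fun (p : List Int × List Int) iq =>
          if PySem.Str.lower keyword ∈ pvNorm iq.2 then (p.1 ++ [iq.1], p.2 ++ [iq.1]) else p)
        ([], [])
      (st.1 ++ [if inner.1 = [] then inner.1 else inner.2], st.2 ++ [keyword]))
    ([], [])
  -- {key: indices[keys.index(key)] for key in keys}; keys.index(key) always succeeds
  -- (key ∈ keys) and its result is in range for indices (built in lockstep with keys),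
  -- so the .getD [] default is never taken
  let dictionary := st.2.foldl (fun d key =>
      d.insert key (((PySem.List.index? st.2 key).bind
        (fun j => PySem.List.pyGet? st.1 (j : Int))).getD []))
    PySem.Dict.empty
  dictionary.items

-- ===== PORT B =====
def multi_word_search_alt (doc_list : List String) (keywords : List String) : List (String × List Int) :=
  -- index = {}; for i, doc in enumerate(doc_list): seen = set(); for token in doc.split(): …
  let index := (PySem.List.enumerate doc_list).foldl
    (fun (idx : PySem.Dict String (List Int)) p =>
      ((PySem.Str.split₀ p.2).foldl
        (fun (st : PySem.Set String × PySem.Dict String (List Int)) token =>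
          if PySem.Set.contains st.1 (pvNormTok token) then st
          -- index.setdefault(w, []).append(i)  ≡  idx[w] = idx.get(w, []) + [i]
          else (PySem.Set.add st.1 (pvNormTok token), st.2.modify (pvNormTok token) [] (· ++ [p.1])))
        (PySem.Set.empty, idx)).2)
    PySem.Dict.empty
  -- {kw: list(index.get(kw.lower(), [])) for kw in keywords}
  (keywords.foldl (fun d kw => d.insert kw (index.getD (PySem.Str.lower kw) []))
    PySem.Dict.empty).items

-- ===== PRECONDITION & SPEC =====
def Spec_multi_word_search (doc_list : List String) (keywords : List String) (out : List (String × List Int)) : Prop := out = multi_word_search_alt doc_list keywords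
instance (doc_list : List String) (keywords : List String) (out : List (String × List Int)) : Decidable (Spec_multi_word_search doc_list keywords out) := by unfold Spec_multi_word_search; infer_instance

-- ===== CLAIM (what is proved, stated in full; the proofs are below) =====
def Claim_equal_multi_word_search : Prop := ∀ (doc_list : List String) (keywords : List String), Dom_multi_word_search doc_list keywords → Spec_multi_word_search doc_list keywords (multi_word_search doc_list keywords)

-- ===== LEMMAS AND PROOFS =====

-- the indices of the (enumerated) documents whose normalized tokens contain w
def pvOcc (w : String) (l : List (Int × String)) : List Int :=
  (l.filter (fun p => decide (w ∈ pvNorm p.2))).map (·.1)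

-- A's inner loop: both accumulated lists equal the occurrence list
theorem pvA_inner (kw : String) (l : List (Int × String)) (acc : List Int) :
    l.foldl (fun (p : List Int × List Int) iq =>
        if PySem.Str.lower kw ∈ pvNorm iq.2 then (p.1 ++ [iq.1], p.2 ++ [iq.1]) else p)
      (acc, acc)
    = (acc ++ pvOcc (PySem.Str.lower kw) l, acc ++ pvOcc (PySem.Str.lower kw) l) := by
  induction l generalizing acc with
  | nil => simp [pvOcc]
  | cons iq t ih =>
    by_cases h : PySem.Str.lower kw ∈ pvNorm iq.2
    · simp only [List.foldl_cons, if_pos h, ih, pvOcc, List.filter_cons, decide_eq_true h]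
      simp [List.append_assoc]
    · simp only [List.foldl_cons, if_neg h, ih, pvOcc, List.filter_cons]
      simp [h]

-- A's outer loop: indices and keys are built in lockstep
theorem pvA_outer (g : String → List Int) (kws : List String) (a : List (List Int)) (b : List String) :
    kws.foldl (fun (st : List (List Int) × List String) kw => (st.1 ++ [g kw], st.2 ++ [kw])) (a, b)
    = (a ++ kws.map g, b ++ kws) := by
  induction kws generalizing a b with
  | nil => simp
  | cons k t ih => simp [ih]

-- indices[keys.index(key)] against the lockstep lists
theorem pvLookup (g : String → List Int) (kws : List String) (key : String) (h : key ∈ kws) :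
    ((PySem.List.index? kws key).bind
      (fun j => PySem.List.pyGet? (kws.map g) (j : Int))).getD [] = g key := by
  induction kws with
  | nil => simp at h
  | cons k t ih =>
    by_cases hk : key = k
    · subst hk
      simp [PySem.List.index?, List.idxOf?_cons, PySem.List.pyGet?_natCast]
    · have h2 : key ∈ t := by
        rcases List.mem_cons.mp h with h1 | h2
        · exact absurd h1 hk
        · exact h2
      have hne : (k == key) = false := by simp [Ne.symm hk]
      simp only [PySem.List.index?, List.idxOf?_cons, hne, Bool.false_eq_true, if_false,
        PySem.List.pyGet?_natCast] at ih ⊢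
      rw [show ((List.idxOf? key t).map (· + 1)).bind (fun j => (List.map g (k :: t))[j]?)
           = (List.idxOf? key t).bind (fun j => (List.map g t)[j]?) from ?_]
      · exact ih h2
      · cases List.idxOf? key t <;> simp

-- B's inner loop: the seen-set adds each document index at most once per token
theorem pvB_inner (i : Int) (l : List String) (s : PySem.Set String)
    (d : PySem.Dict String (List Int)) (w : String) :
    ((l.foldl (fun (st : PySem.Set String × PySem.Dict String (List Int)) token =>
        if PySem.Set.contains st.1 (pvNormTok token) then st
        else (PySem.Set.add st.1 (pvNormTok token), st.2.modify (pvNormTok token) [] (· ++ [i])))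
      (s, d)).2).getD w []
    = d.getD w [] ++ (if w ∈ l.map pvNormTok ∧ ¬ w ∈ s then [i] else []) := by
  induction l generalizing s d with
  | nil => simp
  | cons t ts ih =>
    rw [List.foldl_cons]
    by_cases hm : PySem.Set.contains s (pvNormTok t) = true
    · have hmem : pvNormTok t ∈ s := (PySem.Set.contains_iff _ _).mp hm
      rw [if_pos hm, ih]
      by_cases hc : w = pvNormTok t
      · subst hc; simp [hmem]
      · simp [hc]
    · have hnm : pvNormTok t ∉ s := fun hx => hm ((PySem.Set.contains_iff _ _).mpr hx)
      rw [if_neg hm, ih]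
      by_cases hc : w = pvNormTok t
      · subst hc
        simp [PySem.Dict.getD_modify_self, hnm]
      · rw [PySem.Dict.getD_modify_of_ne _ _ _ hc]
        have h2 : (w ∈ PySem.Set.add s (pvNormTok t)) ↔ w ∈ s := by
          simp [PySem.Set.mem_add, hc]
        simp [h2, hc]

-- B's outer loop: the inverted index holds exactly the occurrence lists
theorem pvB_outer (l : List (Int × String)) (d : PySem.Dict String (List Int)) (w : String) :
    (l.foldl (fun (idx : PySem.Dict String (List Int)) p =>
        ((PySem.Str.split₀ p.2).foldl
          (fun (st : PySem.Set String × PySem.Dict String (List Int)) token =>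
            if PySem.Set.contains st.1 (pvNormTok token) then st
            else (PySem.Set.add st.1 (pvNormTok token), st.2.modify (pvNormTok token) [] (· ++ [p.1])))
          (PySem.Set.empty, idx)).2)
      d).getD w []
    = d.getD w [] ++ pvOcc w l := by
  induction l generalizing d with
  | nil => simp [pvOcc]
  | cons p rest ih =>
    rw [List.foldl_cons, ih, pvB_inner]
    simp only [pvOcc, List.filter_cons, pvNorm]
    by_cases h : w ∈ (PySem.Str.split₀ p.2).map pvNormTok
    · simp [h, PySem.Set.empty]
    · simp [h, PySem.Set.empty]

-- ===== VERDICT (by name: the statement is the Claim_ definition above) =====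
theorem multi_word_search_spec : Claim_equal_multi_word_search := by
  intro doc_list keywords _
  unfold Spec_multi_word_search multi_word_search multi_word_search_alt
  simp only []
  have hbody : (fun (st : List (List Int) × List String) keyword =>
      let inner := (PySem.List.enumerate doc_list).foldl
        (fun (p : List Int × List Int) iq =>
          if PySem.Str.lower keyword ∈ pvNorm iq.2 then (p.1 ++ [iq.1], p.2 ++ [iq.1]) else p)
        ([], [])
      (st.1 ++ [if inner.1 = [] then inner.1 else inner.2], st.2 ++ [keyword]))
      = (fun (st : List (List Int) × List String) keyword =>
          (st.1 ++ [pvOcc (PySem.Str.lower keyword) (PySem.List.enumerate doc_list)],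
           st.2 ++ [keyword])) := by
    funext st kw
    show (st.1 ++ [_], st.2 ++ [kw]) = _
    rw [pvA_inner]
    simp
  rw [hbody, pvA_outer]
  simp only [List.nil_append]
  have hdict : keywords.foldl (fun d key =>
        d.insert key (((PySem.List.index? keywords key).bind
          (fun j => PySem.List.pyGet? (keywords.map
            (fun kw => pvOcc (PySem.Str.lower kw) (PySem.List.enumerate doc_list))) (j : Int))).getD []))
        PySem.Dict.empty
      = keywords.foldl (fun d key =>
          d.insert key (pvOcc (PySem.Str.lower key) (PySem.List.enumerate doc_list)))
        PySem.Dict.empty := by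
    apply PySem.List.foldl_congr_mem
    intro d key hmem
    rw [pvLookup _ _ _ hmem]
  rw [hdict]
  have hB : (fun (d : PySem.Dict String (List Int)) kw =>
        d.insert kw (((PySem.List.enumerate doc_list).foldl
          (fun (idx : PySem.Dict String (List Int)) p =>
            ((PySem.Str.split₀ p.2).foldl
              (fun (st : PySem.Set String × PySem.Dict String (List Int)) token =>
                if PySem.Set.contains st.1 (pvNormTok token) then st
                else (PySem.Set.add st.1 (pvNormTok token), st.2.modify (pvNormTok token) [] (· ++ [p.1])))
              (PySem.Set.empty, idx)).2)
          PySem.Dict.empty).getD (PySem.Str.lower kw) []))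
      = (fun (d : PySem.Dict String (List Int)) kw =>
          d.insert kw (pvOcc (PySem.Str.lower kw) (PySem.List.enumerate doc_list))) := by
    funext d kw
    rw [pvB_outer]
    simp [PySem.Dict.getD_empty]
  rw [hB]
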